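-- pv_equiv track=rewrite | github.com/AndrewWasHere/visual_arithmetic | visual_arithmetic.py | visualize
-- ===== SOURCE A (Python) =====
-- def visualize( value ):
--     """Number and avocados"""
--     s = "%2d" % value # Only works well with 1- and 2-digit numbers right now.
--     s += '\t'
--     for i in range( value ):
--         s += 'o '
--         if ( i + 1 ) % 10 == 0:
--             # Group sets of 10
--             s += ' '
--     return s
-- ===== SOURCE B (Python) =====
-- def visualize(value):
--     """Number and avocados"""
--     n = value if value > 0 else 0
--     full, rem = divmod(n, 10)
--     body = ('o ' * 10 + ' ') * full + 'o ' * rem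
--     return '%2d\t' % value + body
-- ===== Notes on version B (the rewrite author's own statement) =====
-- stated objective: faster
-- what changed: B derives the group structure arithmetically with a single divmod by the group size and builds the body by string repetition of whole ten-marker chunks plus a remainder, instead of A's per-marker loop appending and testing a modulo on every iteration.
import Mathlib
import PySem

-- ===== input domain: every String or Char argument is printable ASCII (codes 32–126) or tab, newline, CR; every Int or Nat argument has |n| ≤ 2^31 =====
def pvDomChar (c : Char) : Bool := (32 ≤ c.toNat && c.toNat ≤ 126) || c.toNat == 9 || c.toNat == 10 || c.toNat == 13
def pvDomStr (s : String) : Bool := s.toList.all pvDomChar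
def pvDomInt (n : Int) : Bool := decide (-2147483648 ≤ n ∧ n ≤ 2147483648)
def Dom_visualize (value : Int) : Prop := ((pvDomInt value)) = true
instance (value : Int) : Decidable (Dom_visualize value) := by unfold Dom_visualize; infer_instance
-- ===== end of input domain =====

-- B replaces A's per-marker loop (testing (i+1)%10 each step) by divmod(n,10) arithmetic and
-- string repetition of whole 10-marker chunks; alternative decomposition, same output.


-- "%2d" % value: str(value) right-justified to width 2 with spaces (exact for any int:
-- Python pads only when the decimal rendering is shorter than 2).
def pad2 (s : List Char) : List Char :=
  if s.length < 2 then List.replicate (2 - s.length) ' ' ++ s else s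

-- ===== PORT A =====
def visualize (value : Int) : String :=
  -- s = "%2d" % value; s += '\t'; then for i in range(value): s += 'o '; if (i+1)%10==0: s += ' '
  String.mk ((PySem.List.pyRange 0 value 1).foldl
    (fun s i => s ++ (['o', ' '] ++ (if PySem.Int.mod (i + 1) 10 = 0 then [' '] else [])))
    (pad2 (PySem.Int.toChars value) ++ ['\t']))

-- ===== PORT B =====
def visualize_alt (value : Int) : String :=
  let n : Int := if value > 0 then value else 0
  let full := PySem.Int.floordiv n 10
  let rem := PySem.Int.mod n 10
  String.mk (pad2 (PySem.Int.toChars value) ++ ['\t'] ++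
    PySem.List.pyRepeat (PySem.List.pyRepeat ['o', ' '] 10 ++ [' ']) full ++
    PySem.List.pyRepeat ['o', ' '] rem)

-- ===== PRECONDITION & SPEC =====
def Spec_visualize (value : Int) (out : String) : Prop := out = visualize_alt value
instance (value : Int) (out : String) : Decidable (Spec_visualize value out) := by unfold Spec_visualize; infer_instance

-- ===== CLAIM (what is proved, stated in full; the proofs are below) =====
def Claim_equal_visualize : Prop := ∀ (value : Int), Dom_visualize value → Spec_visualize value (visualize value)

-- ===== LEMMAS AND PROOFS =====

-- The loop body over Nat indices equals the divmod closed form.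
lemma body_closed (n : Nat) :
    (List.range n).flatMap
      (fun k => ['o', ' '] ++ (if (k + 1) % 10 = 0 then ([' '] : List Char) else [])) =
    (List.replicate (n / 10) ((List.replicate 10 (['o', ' '] : List Char)).flatten ++ [' '])).flatten
      ++ (List.replicate (n % 10) (['o', ' '] : List Char)).flatten := by
  induction n with
  | zero => simp
  | succ n ih =>
    rw [List.range_succ, List.flatMap_append, ih, List.flatMap_singleton]
    by_cases h : (n + 1) % 10 = 0
    · have h9 : n % 10 = 9 := by omega
      have hd : (n + 1) / 10 = n / 10 + 1 := by omega
      have h10 : (List.replicate 10 (['o', ' '] : List Char)).flatten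
          = (List.replicate 9 (['o', ' '] : List Char)).flatten ++ ['o', ' '] := rfl
      rw [if_pos h, h, h9, hd, List.replicate_succ' (n := n / 10), List.flatten_append, h10]
      simp [List.append_assoc]
    · have hd : (n + 1) / 10 = n / 10 := by omega
      have hm : (n + 1) % 10 = n % 10 + 1 := by omega
      rw [if_neg h, hd, hm, List.replicate_succ' (n := n % 10), List.flatten_append]
      simp [List.append_assoc]

theorem visualize_spec : Claim_equal_visualize := by
  unfold Claim_equal_visualize Spec_visualize
  intro value _
  unfold visualize visualize_alt
  by_cases hv : value > 0
  · obtain ⟨n, rfl⟩ : ∃ n : Nat, value = (n : Int) := ⟨value.toNat, by omega⟩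
    rw [PySem.List.pyRange_zero_natCast, PySem.List.foldl_append_eq_flatMap, List.flatMap_map]
    have hg : (fun k : Nat => ['o', ' '] ++ (if PySem.Int.mod ((k : Int) + 1) 10 = 0 then ([' '] : List Char) else []))
        = fun k : Nat => ['o', ' '] ++ (if (k + 1) % 10 = 0 then ([' '] : List Char) else []) := by
      funext k
      have h1 : ((k : Int) + 1) = ((k + 1 : Nat) : Int) := by push_cast; ring
      have h2 : PySem.Int.mod ((k + 1 : Nat) : Int) 10 = (((k + 1) % 10 : Nat) : Int) := by
        exact_mod_cast PySem.Int.mod_natCast (k + 1) 10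
      rw [h1, h2]
      norm_cast
    simp only [hg, body_closed]
    have hn : (if (n : Int) > 0 then (n : Int) else 0) = (n : Int) := by
      rw [if_pos (by exact_mod_cast hv)]
    have hfd : PySem.Int.floordiv (n : Int) 10 = ((n / 10 : Nat) : Int) := by
      exact_mod_cast PySem.Int.floordiv_natCast n 10
    have hmd : PySem.Int.mod (n : Int) 10 = ((n % 10 : Nat) : Int) := by
      exact_mod_cast PySem.Int.mod_natCast n 10
    rw [hn, hfd, hmd]
    simp only [PySem.List.pyRepeat, Int.toNat_natCast, List.append_assoc,
      show Int.toNat 10 = 10 from rfl]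
  · have h0 : PySem.List.pyRange 0 value 1 = [] := PySem.List.pyRange_one_eq_nil (by omega)
    have hn : (if value > 0 then value else 0) = 0 := if_neg hv
    rw [h0, hn]
    simp [PySem.List.pyRepeat, PySem.Int.floordiv, PySem.Int.mod]
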